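-- pv_equiv track=rewrite | github.com/zungybungy/Codility | L15_CountDistinctSlices.py | solution
-- ===== SOURCE A (Python) =====
-- def solution(M, A):
--     the_sum = 0
--     front = back = 0
--     seen = [False] * (M + 1)
--     while (front < len(A) and back < len(A)):
--         while (front < len(A) and seen[A[front]] != True):
--             the_sum += (front - back + 1)
--             seen[A[front]] = True
--             front += 1
--         else:
--             while front < len(A) and back < len(A) and A[back] != A[front]:
--                 seen[A[back]] = False
--                 back += 1
--
--             seen[A[back]] = False
--             back += 1
--
--     return min(the_sum, 1000000000)
-- ===== SOURCE B (Python) =====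
-- def solution(M, A):
--     total = 0
--     back = 0
--     last = {}
--     for front, v in enumerate(A):
--         prev = last.get(v, -1)
--         if prev >= back:
--             back = prev + 1
--         last[v] = front
--         total += front - back + 1
--     return min(total, 1000000000)
-- ===== Notes on version B (the rewrite author's own statement) =====
-- stated objective: simpler
-- what changed: A's nested shrink loops that pop window elements one by one from a boolean seen-array are replaced by a single forward pass keeping a dictionary of last occurrences, so the left pointer jumps directly past the previous occurrence instead of being walked there.
-- intended difference: On inputs containing two unequal elements congruent mod M+1 (only possible with negative elements, e.g. M=1, A=[-2,0]) A's seen list indexed by the element conflates the two values through Python's negative-index wraparound and returns 1 on the witness, while B, keying last occurrences by the value itself, returns 3, the actual number of distinct-valued slices. — e.g. on solution(1, [-2, 0]): A returns 1, B returns 3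
import Mathlib
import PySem

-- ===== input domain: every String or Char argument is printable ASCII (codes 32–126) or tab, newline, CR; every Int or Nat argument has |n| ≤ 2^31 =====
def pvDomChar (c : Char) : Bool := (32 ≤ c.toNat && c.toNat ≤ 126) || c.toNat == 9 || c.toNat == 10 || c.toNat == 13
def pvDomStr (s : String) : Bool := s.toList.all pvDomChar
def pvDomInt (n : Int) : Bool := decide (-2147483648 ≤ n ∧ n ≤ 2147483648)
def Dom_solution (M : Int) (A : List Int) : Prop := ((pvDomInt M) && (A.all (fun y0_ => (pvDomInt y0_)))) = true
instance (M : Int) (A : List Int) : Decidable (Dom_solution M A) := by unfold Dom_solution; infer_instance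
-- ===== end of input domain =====

-- B replaces A's incremental shrink loops with a last-occurrence dictionary and a single
-- jump of the left pointer per element (objective: simpler, one pass, no nested loops).

-- ===== PORT A =====
-- Literal port of A's nested while loops. front/back are kept as Nats (they are
-- non-negative Python ints); seen-indexing uses pyGetD/pySetD, exact Python list
-- indexing (including negative-index wraparound) with the out-of-range IndexError
-- cases returning a default — those inputs are excluded by Pre_solution.

-- inner grow loop: 'while front < len(A) and seen[A[front]] != True: ...'
-- (fuel = A.length - front bounds the loop exactly; when fuel runs out the guard is false anyway)
def growA (A : List Int) : Nat → Int → Nat → Nat → List Bool → Int × Nat × List Bool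
  | 0, sum, front, _, seen => (sum, front, seen)
  | fuel + 1, sum, front, back, seen =>
    if front < A.length then
      if PySem.List.pyGetD seen (A.getD front 0) false = true then (sum, front, seen)
      else growA A fuel (sum + ((front : Int) - (back : Int) + 1)) (front + 1) back
             (PySem.List.pySetD seen (A.getD front 0) true)
    else (sum, front, seen)

-- inner shrink loop: 'while front < len(A) and back < len(A) and A[back] != A[front]: ...'
def shrinkA (A : List Int) : Nat → Nat → Nat → List Bool → Nat × List Bool
  | 0, _, back, seen => (back, seen)
  | fuel + 1, front, back, seen =>
    if front < A.length ∧ back < A.length ∧ A.getD back 0 ≠ A.getD front 0 then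
      shrinkA A fuel front (back + 1) (PySem.List.pySetD seen (A.getD back 0) false)
    else (back, seen)

-- outer loop: 'while front < len(A) and back < len(A): ...' (fuel = A.length suffices:
-- back strictly increases each iteration and the guard needs back < len(A))
def outerA (A : List Int) : Nat → Int → Nat → Nat → List Bool → Int
  | 0, sum, _, _, _ => sum
  | fuel + 1, sum, front, back, seen =>
    if front < A.length ∧ back < A.length then
      let r := growA A (A.length - front) sum front back seen
      let s := shrinkA A (A.length - back) r.2.1 back r.2.2
      outerA A fuel r.1 r.2.1 (s.1 + 1) (PySem.List.pySetD s.2 (A.getD s.1 0) false)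
    else sum

def solution (M : Int) (A : List Int) : Int :=
  min (outerA A A.length 0 0 0 (PySem.List.pyRepeat [false] (M + 1))) 1000000000

-- ===== PORT B =====
-- one step of B's for-loop over enumerate(A); state = (total, back, last)
def stepB (st : Int × Int × PySem.Dict Int Int) (fv : Int × Int) :
    Int × Int × PySem.Dict Int Int :=
  let prev := st.2.2.getD fv.2 (-1)
  let back := if prev ≥ st.2.1 then prev + 1 else st.2.1
  (st.1 + (fv.1 - back + 1), back, st.2.2.insert fv.2 fv.1)

def solution_alt (M : Int) (A : List Int) : Int :=
  let st := (PySem.List.enumerate A).foldl stepB (0, 0, PySem.Dict.empty)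
  min st.1 1000000000

-- ===== PRECONDITION & SPEC =====
-- Pre_ excludes exactly the inputs on which A raises IndexError: some A[i] > M or
-- A[i] < -(M+1) (an invalid Python index into the seen list of length M+1).
def Pre_solution (M : Int) (A : List Int) : Prop := ∀ x ∈ A, -(M + 1) ≤ x ∧ x ≤ M
instance (M : Int) (A : List Int) : Decidable (Pre_solution M A) := by
  unfold Pre_solution; infer_instance

def pvWitness_solution : Int × List Int := (3, [0, 1, 2, 1, 3, 0])

-- On inputs with two unequal elements congruent mod M+1 (possible only via negative
-- values, e.g. -2 and 0 with M = 1), A indexes its seen list by the element, so Python's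
-- negative-index wraparound conflates the two values and A returns a count that treats
-- them as equal (1 on the witness); B keys last occurrences by the value itself and
-- returns the count of distinct-valued slices (3), which is the intended answer.
def D_solution (M : Int) (A : List Int) : Prop :=
  ∃ x ∈ A, ∃ y ∈ A, x ≠ y ∧ x % (M + 1) = y % (M + 1)
instance (M : Int) (A : List Int) : Decidable (D_solution M A) := by
  unfold D_solution; infer_instance

def Spec_solution (M : Int) (A : List Int) (out : Int) : Prop :=
  ¬ D_solution M A → out = solution_alt M A
instance (M : Int) (A : List Int) (out : Int) : Decidable (Spec_solution M A out) := by
  unfold Spec_solution; infer_instance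

def pvDiffWitness_solution : Int × List Int := (1, [-2, 0])
def pvDiffWitnessOut_solution : Int × Int := (1, 3)

-- ===== CLAIM (what is proved, stated in full; the proofs are below) =====
def Claim_unchanged_solution : Prop :=
  ∀ (M : Int) (A : List Int), Dom_solution M A → Pre_solution M A →
    Spec_solution M A (solution M A)
def Claim_changed_solution : Prop :=
  Dom_solution (pvDiffWitness_solution.1) (pvDiffWitness_solution.2) ∧
  Pre_solution (pvDiffWitness_solution.1) (pvDiffWitness_solution.2) ∧
  D_solution (pvDiffWitness_solution.1) (pvDiffWitness_solution.2) ∧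
  solution (pvDiffWitness_solution.1) (pvDiffWitness_solution.2) = pvDiffWitnessOut_solution.1 ∧
  solution_alt (pvDiffWitness_solution.1) (pvDiffWitness_solution.2) = pvDiffWitnessOut_solution.2 ∧
  pvDiffWitnessOut_solution.1 ≠ pvDiffWitnessOut_solution.2

-- ===== LEMMAS AND PROOFS =====

-- index of the last occurrence of v in A[0:f], or -1
def lastIdx (A : List Int) (f : Nat) (v : Int) : Int :=
  match f with
  | 0 => -1
  | f + 1 => if A.getD f 0 = v then (f : Int) else lastIdx A f v

-- B's loop written as a recursion over the index f (proved equal to the foldl below)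
def runB (A : List Int) (sum : Int) (f : Nat) (back : Int) (last : PySem.Dict Int Int) : Int :=
  if _h : f < A.length then
    let v := A.getD f 0
    let prev := last.getD v (-1)
    let back' := if prev ≥ back then prev + 1 else back
    runB A (sum + ((f : Int) - back' + 1)) (f + 1) back' (last.insert v (f : Int))
  else sum
termination_by A.length - f

-- v occurs in the window A[back:f]
def occ (A : List Int) (back f : Nat) (v : Int) : Prop :=
  ∃ j, back ≤ j ∧ j < f ∧ A.getD j 0 = v

-- simulation invariant tying A's state (back, seen) to B's state (back, last) at index f
def SimInv (M : Int) (A : List Int) (f back : Nat) (seen : List Bool)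
    (last : PySem.Dict Int Int) : Prop :=
  back ≤ f ∧ f ≤ A.length ∧ seen.length = (M + 1).toNat ∧
  (∀ v : Int, v ∈ A → (PySem.List.pyGetD seen v false = true ↔ occ A back f v)) ∧
  (∀ i j : Nat, back ≤ i → i < j → j < f → A.getD i 0 ≠ A.getD j 0) ∧
  (∀ v : Int, last.getD v (-1) = lastIdx A f v)

theorem lastIdx_spec (A : List Int) (f : Nat) (v : Int) (h : 0 ≤ lastIdx A f v) :
    (lastIdx A f v).toNat < f ∧ A.getD (lastIdx A f v).toNat 0 = v := by
  induction f with
  | zero => simp [lastIdx] at h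
  | succ f ih =>
    by_cases hv : A.getD f 0 = v
    · simp only [lastIdx, if_pos hv]
      exact ⟨by simp, by simpa using hv⟩
    · simp only [lastIdx, if_neg hv] at h ⊢
      have := ih h
      exact ⟨by omega, this.2⟩

theorem lastIdx_ge (A : List Int) (f j : Nat) (v : Int) (hj : j < f)
    (hv : A.getD j 0 = v) : (j : Int) ≤ lastIdx A f v := by
  induction f with
  | zero => omega
  | succ f ih =>
    simp only [lastIdx]
    by_cases hjf : j = f
    · subst hjf; rw [if_pos hv]
    · have := ih (by omega)
      split <;> [push_cast; skip] <;> omega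

theorem occ_iff_lastIdx_ge (A : List Int) (back f : Nat) (v : Int) :
    occ A back f v ↔ (back : Int) ≤ lastIdx A f v := by
  constructor
  · rintro ⟨j, h1, h2, h3⟩
    exact le_trans (by exact_mod_cast h1) (lastIdx_ge A f j v h2 h3)
  · intro h
    have h0 : 0 ≤ lastIdx A f v := le_trans (by positivity) h
    obtain ⟨hlt, hv⟩ := lastIdx_spec A f v h0
    refine ⟨(lastIdx A f v).toNat, by omega, hlt, hv⟩

theorem getD_mem_of_lt (A : List Int) (i : Nat) (h : i < A.length) : A.getD i 0 ∈ A := by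
  rw [List.getD_eq_getElem?_getD, List.getElem?_eq_getElem h]
  exact List.getElem_mem h

-- Python's index normalisation for an in-range (possibly negative) index is mod length
theorem pyIdx_mod (n : Nat) (v : Int) (h1 : -(n : Int) ≤ v) (h2 : v < (n : Int)) :
    PySem.List.pyIdx? n v = some ((v % (n : Int)).toNat) := by
  unfold PySem.List.pyIdx?
  by_cases h : 0 ≤ v
  · rw [if_pos h, if_pos h2, Int.emod_eq_of_lt h h2]
  · rw [if_neg h, if_pos h1]
    have hn : 0 < n := by omega
    have hmod : v % (n : Int) = v + n := by
      have h3 : (v + (n : Int) * 1) % (n : Int) = v % (n : Int) :=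
        Int.add_mul_emod_self_left v (n : Int) 1
      rw [mul_one] at h3
      rw [← h3, Int.emod_eq_of_lt (by omega) (by omega)]
    rw [hmod]
    congr 1
    omega

theorem pyGetD_mod (xs : List Bool) (v : Int) (d : Bool)
    (h1 : -(xs.length : Int) ≤ v) (h2 : v < (xs.length : Int)) :
    PySem.List.pyGetD xs v d = xs.getD (v % (xs.length : Int)).toNat d := by
  rw [PySem.List.pyGetD, PySem.List.pyGet?, pyIdx_mod xs.length v h1 h2]
  rw [List.getD_eq_getElem?_getD]
  rfl

theorem pySetD_mod (xs : List Bool) (v : Int) (b : Bool)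
    (h1 : -(xs.length : Int) ≤ v) (h2 : v < (xs.length : Int)) :
    PySem.List.pySetD xs v b = xs.set (v % (xs.length : Int)).toNat b := by
  rw [PySem.List.pySetD, PySem.List.pySet?, pyIdx_mod xs.length v h1 h2]
  rfl

theorem getD_set_bool (xs : List Bool) (i j : Nat) (b : Bool) :
    (xs.set i b).getD j false = if j = i then (if i < xs.length then b else xs.getD j false)
      else xs.getD j false := by
  by_cases h : j = i
  · subst h
    by_cases hl : j < xs.length
    · simp [List.getD_eq_getElem?_getD, hl]
    · simp [List.getD_eq_getElem?_getD, hl]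
  · simp [List.getD_eq_getElem?_getD, h, Ne.symm h]

-- reading after writing, both through Python indexing, on a slot-injective value set
theorem seen_update (M : Int) (xs : List Bool) (w v : Int) (b : Bool)
    (hlen : xs.length = (M + 1).toNat) (hM : 0 ≤ M)
    (hv1 : -(M + 1) ≤ v) (hv2 : v ≤ M) (hw1 : -(M + 1) ≤ w) (hw2 : w ≤ M)
    (hinj : v % (M + 1) = w % (M + 1) → v = w) :
    PySem.List.pyGetD (PySem.List.pySetD xs w b) v false
      = if v = w then b else PySem.List.pyGetD xs v false := by
  have hcast : ((xs.length : Nat) : Int) = M + 1 := by rw [hlen]; omega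
  have hv1' : -(xs.length : Int) ≤ v := by omega
  have hv2' : v < (xs.length : Int) := by omega
  have hw1' : -(xs.length : Int) ≤ w := by omega
  have hw2' : w < (xs.length : Int) := by omega
  have hlen2 : (PySem.List.pySetD xs w b).length = xs.length := PySem.List.length_pySetD xs w b
  have hslot : (w % (M + 1)).toNat < xs.length := by
    have := Int.emod_lt_of_pos w (by omega : (0 : Int) < M + 1)
    have := Int.emod_nonneg w (by omega : (M + 1 : Int) ≠ 0)
    omega
  rw [pySetD_mod xs w b hw1' hw2',
    pyGetD_mod _ v false (by rw [List.length_set]; omega) (by rw [List.length_set]; omega),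
    List.length_set, hcast, getD_set_bool]
  by_cases h : (v % (M + 1)).toNat = (w % (M + 1)).toNat
  · have hvw : v = w := by
      refine hinj ?_
      have := Int.emod_nonneg w (by omega : (M + 1 : Int) ≠ 0)
      have := Int.emod_nonneg v (by omega : (M + 1 : Int) ≠ 0)
      omega
    rw [if_pos h, if_pos hslot, if_pos hvw]
  · have hvw : v ≠ w := fun he => h (by rw [he])
    rw [if_neg h, if_neg hvw, pyGetD_mod xs v false hv1' hv2', hcast]

-- B's foldl over enumerate(A), started at index f, is runB
theorem foldl_stepB_eq_runB (A : List Int) :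
    ∀ k f sum back last, A.length - f ≤ k → f ≤ A.length →
    ((PySem.List.enumerate (A.drop f) (f : Int)).foldl stepB (sum, back, last)).1
      = runB A sum f back last := by
  intro k
  induction k with
  | zero =>
    intro f sum back last hk hf
    have hf' : f = A.length := by omega
    subst hf'
    simp [List.drop_length, PySem.List.enumerate_nil, runB]
  | succ k ih =>
    intro f sum back last hk hf
    by_cases h : f < A.length
    · have hdrop : A.drop f = A[f] :: A.drop (f + 1) := List.drop_eq_getElem_cons h
      have hgetD : A.getD f 0 = A[f] := by
        rw [List.getD_eq_getElem?_getD, List.getElem?_eq_getElem h]; rfl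
      rw [hdrop, PySem.List.enumerate_cons, List.foldl_cons]
      have hcast : (f : Int) + 1 = ((f + 1 : Nat) : Int) := by push_cast; ring
      rw [hcast, runB]
      rw [dif_pos h]
      simp only [stepB, hgetD]
      exact ih (f + 1) _ _ _ (by omega) (by omega)
    · have hf' : f = A.length := by omega
      subst hf'
      simp [List.drop_length, PySem.List.enumerate_nil, runB]

theorem solution_alt_eq_runB (M : Int) (A : List Int) :
    solution_alt M A = min (runB A 0 0 0 PySem.Dict.empty) 1000000000 := by
  have := foldl_stepB_eq_runB A A.length 0 0 0 PySem.Dict.empty (by omega) (by omega)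
  simp only [List.drop_zero, Nat.cast_zero] at this
  simp only [solution_alt]
  rw [this]

-- one grow step preserves the invariant
theorem SimInv_grow_step (M : Int) (A : List Int) (f back : Nat) (seen : List Bool)
    (last : PySem.Dict Int Int) (hM : 0 ≤ M) (hR : ∀ x ∈ A, -(M + 1) ≤ x ∧ x ≤ M)
    (hinj : ∀ x ∈ A, ∀ y ∈ A, x % (M + 1) = y % (M + 1) → x = y)
    (hInv : SimInv M A f back seen last) (hf : f < A.length)
    (hnot : ¬ PySem.List.pyGetD seen (A.getD f 0) false = true) :
    SimInv M A (f + 1) back (PySem.List.pySetD seen (A.getD f 0) true)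
      (last.insert (A.getD f 0) (f : Int)) := by
  obtain ⟨hbf, hfl, hlen, hiff, hdist, hlast⟩ := hInv
  set v := A.getD f 0 with hv
  have hvmem : v ∈ A := hv ▸ getD_mem_of_lt A f hf
  have hvb := hR v hvmem
  refine ⟨by omega, by omega, by rw [PySem.List.length_pySetD]; exact hlen, ?_, ?_, ?_⟩
  · intro w hwmem
    have hwb := hR w hwmem
    rw [seen_update M seen v w true hlen hM hwb.1 hwb.2 hvb.1 hvb.2
      (fun h => hinj w hwmem v hvmem h)]
    by_cases hwv : w = v
    · subst hwv
      rw [if_pos rfl]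
      constructor
      · intro _; exact ⟨f, hbf, by omega, hv.symm⟩
      · intro _; rfl
    · rw [if_neg hwv, hiff w hwmem]
      constructor
      · rintro ⟨j, h1, h2, h3⟩; exact ⟨j, h1, by omega, h3⟩
      · rintro ⟨j, h1, h2, h3⟩
        refine ⟨j, h1, ?_, h3⟩
        rcases Nat.lt_or_ge j f with h | h
        · exact h
        · exfalso; have : j = f := by omega
          subst this; exact hwv h3.symm
  · intro i j h1 h2 h3
    rcases Nat.lt_or_ge j f with h | h
    · exact hdist i j h1 h2 h
    · have hj : j = f := by omega
      intro heq
      have hocc : occ A back f v := ⟨i, h1, by omega, by rw [heq, hj, ← hv]⟩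
      exact hnot ((hiff v hvmem).2 hocc)
  · intro w
    by_cases hwv : w = v
    · subst hwv
      rw [PySem.Dict.getD_insert_self]
      simp only [lastIdx]
      rw [if_pos hv.symm]
    · rw [PySem.Dict.getD_insert_of_ne _ _ _ hwv, hlast w]
      simp only [lastIdx]
      rw [if_neg (fun h => hwv ((hv.trans h).symm))]

-- the grow loop simulates B's loop with back unchanged
theorem grow_sim (M : Int) (A : List Int) (hM : 0 ≤ M) (hR : ∀ x ∈ A, -(M + 1) ≤ x ∧ x ≤ M)
    (hinj : ∀ x ∈ A, ∀ y ∈ A, x % (M + 1) = y % (M + 1) → x = y) :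
    ∀ k f back sum seen last, A.length - f ≤ k → SimInv M A f back seen last →
    ∃ f' sum' seen' last',
      growA A k sum f back seen = (sum', f', seen') ∧
      SimInv M A f' back seen' last' ∧ f ≤ f' ∧
      runB A sum f (back : Int) last = runB A sum' f' (back : Int) last' ∧
      (f' < A.length → PySem.List.pyGetD seen' (A.getD f' 0) false = true) := by
  intro k
  induction k with
  | zero =>
    intro f back sum seen last hk hInv
    have hf : ¬ f < A.length := by omega
    exact ⟨f, sum, seen, last, rfl, hInv, le_refl f, rfl, fun h => absurd h hf⟩
  | succ k ih =>
    intro f back sum seen last hk hInv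
    by_cases hf : f < A.length
    · by_cases hs : PySem.List.pyGetD seen (A.getD f 0) false = true
      · refine ⟨f, sum, seen, last, ?_, hInv, le_refl f, rfl, fun _ => hs⟩
        simp only [growA]
        rw [if_pos hf, if_pos hs]
      · have hInv' := SimInv_grow_step M A f back seen last hM hR hinj hInv hf hs
        obtain ⟨f', sum', seen', last', heq, hI, hle, hrun, hstop⟩ :=
          ih (f + 1) back (sum + ((f : Int) - (back : Int) + 1)) _ _ (by omega) hInv'
        refine ⟨f', sum', seen', last', ?_, hI, by omega, ?_, hstop⟩
        · simp only [growA]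
          rw [if_pos hf, if_neg hs]; exact heq
        · rw [runB, dif_pos hf]
          have hprev : last.getD (A.getD f 0) (-1) = lastIdx A f (A.getD f 0) :=
            hInv.2.2.2.2.2 (A.getD f 0)
          have hnocc : ¬ occ A back f (A.getD f 0) := fun h =>
            hs ((hInv.2.2.2.1 (A.getD f 0) (getD_mem_of_lt A f hf)).2 h)
          have hlt : lastIdx A f (A.getD f 0) < (back : Int) := by
            by_contra hle
            exact hnocc ((occ_iff_lastIdx_ge A back f (A.getD f 0)).2 (by omega))
          simp only [hprev, ge_iff_le,
            if_neg (by omega : ¬ (back : Int) ≤ lastIdx A f (A.getD f 0))]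
          exact hrun
    · refine ⟨f, sum, seen, last, ?_, hInv, le_refl f, rfl, fun h => absurd h hf⟩
      simp only [growA]
      rw [if_neg hf]

-- clearing the left end of the window preserves the invariant with back+1
theorem SimInv_shrink_step (M : Int) (A : List Int) (hM : 0 ≤ M) (hR : ∀ x ∈ A, -(M + 1) ≤ x ∧ x ≤ M)
    (hinj : ∀ x ∈ A, ∀ y ∈ A, x % (M + 1) = y % (M + 1) → x = y)
    (f back : Nat) (seen : List Bool) (last : PySem.Dict Int Int)
    (hInv : SimInv M A f back seen last) (hbf : back < f) (hfl : f < A.length) :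
    SimInv M A f (back + 1) (PySem.List.pySetD seen (A.getD back 0) false) last := by
  obtain ⟨hb1, hb2, hlen, hiff, hdist, hlast⟩ := hInv
  have hbmem : A.getD back 0 ∈ A := getD_mem_of_lt A back (by omega)
  have hwb := hR (A.getD back 0) hbmem
  refine ⟨by omega, hb2, by rw [PySem.List.length_pySetD]; exact hlen, ?_, ?_, hlast⟩
  · intro u humem
    have hub := hR u humem
    rw [seen_update M seen (A.getD back 0) u false hlen hM hub.1 hub.2 hwb.1 hwb.2
      (fun h => hinj u humem (A.getD back 0) hbmem h)]
    by_cases huw : u = A.getD back 0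
    · rw [if_pos huw]
      constructor
      · intro h; exact absurd h (by simp)
      · rintro ⟨j, h1, h2, h3⟩
        exact absurd (huw ▸ h3 : A.getD j 0 = A.getD back 0).symm
          (hdist back j (le_refl back) (by omega) h2)
    · rw [if_neg huw, hiff u humem]
      constructor
      · rintro ⟨j, h1, h2, h3⟩
        refine ⟨j, ?_, h2, h3⟩
        rcases Nat.eq_or_lt_of_le h1 with h | h
        · exact absurd (h ▸ h3.symm) huw
        · omega
      · rintro ⟨j, h1, h2, h3⟩; exact ⟨j, by omega, h2, h3⟩
  · intro i j h1 h2 h3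
    exact hdist i j (by omega) h2 h3

-- the shrink loop plus the final clear: back jumps to just past the last occurrence of A[f]
theorem shrink_sim (M : Int) (A : List Int) (hM : 0 ≤ M) (hR : ∀ x ∈ A, -(M + 1) ≤ x ∧ x ≤ M)
    (hinj : ∀ x ∈ A, ∀ y ∈ A, x % (M + 1) = y % (M + 1) → x = y)
    (f : Nat) (last : PySem.Dict Int Int) (hf : f < A.length) :
    ∀ k back seen, f - back ≤ k → SimInv M A f back seen last →
    PySem.List.pyGetD seen (A.getD f 0) false = true →
    ∃ back₂ seen₂, shrinkA A k f back seen = (back₂, seen₂) ∧ back ≤ back₂ ∧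
      ((back₂ : Int) = lastIdx A f (A.getD f 0)) ∧ back₂ < f ∧
      SimInv M A f (back₂ + 1) (PySem.List.pySetD seen₂ (A.getD back₂ 0) false) last := by
  intro k
  induction k with
  | zero =>
    intro back seen hk hInv hseen
    exfalso
    obtain ⟨j, hj1, hj2, hj3⟩ :=
      (hInv.2.2.2.1 (A.getD f 0) (getD_mem_of_lt A f hf)).1 hseen
    omega
  | succ k ih =>
    intro back seen hk hInv hseen
    obtain ⟨j, hj1, hj2, hj3⟩ :=
      (hInv.2.2.2.1 (A.getD f 0) (getD_mem_of_lt A f hf)).1 hseen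
    have hbf : back < f := by omega
    by_cases hb : A.getD back 0 = A.getD f 0
    · -- loop stops; back is the (unique) occurrence of A[f] in the window
      have hge : (back : Int) ≤ lastIdx A f (A.getD f 0) :=
        (occ_iff_lastIdx_ge A back f (A.getD f 0)).1 ⟨j, hj1, hj2, hj3⟩
      obtain ⟨hlt, hvv⟩ := lastIdx_spec A f (A.getD f 0) (by omega)
      have heqb : (back : Int) = lastIdx A f (A.getD f 0) := by
        by_contra hne
        have hlt2 : back < (lastIdx A f (A.getD f 0)).toNat := by omega
        exact hInv.2.2.2.2.1 back (lastIdx A f (A.getD f 0)).toNat (le_refl back) hlt2 hlt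
          (hb.trans hvv.symm)
      refine ⟨back, seen, ?_, le_refl back, heqb, hbf, ?_⟩
      · simp only [shrinkA]
        rw [if_neg (fun hc => hc.2.2 hb)]
      · exact SimInv_shrink_step M A hM hR hinj f back seen last hInv hbf hf
    · -- loop steps: clear seen[A[back]] and advance back
      have hInv' := SimInv_shrink_step M A hM hR hinj f back seen last hInv hbf hf
      have hseen' : PySem.List.pyGetD (PySem.List.pySetD seen (A.getD back 0) false)
          (A.getD f 0) false = true := by
        refine (hInv'.2.2.2.1 (A.getD f 0) (getD_mem_of_lt A f hf)).2 ?_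
        have hjb : j ≠ back := fun h => hb (h ▸ hj3 : A.getD back 0 = A.getD f 0)
        exact ⟨j, by omega, hj2, hj3⟩
      obtain ⟨back₂, seen₂, heq, hle, hlast2, hblt, hI⟩ :=
        ih (back + 1) _ (by omega) hInv' hseen'
      refine ⟨back₂, seen₂, ?_, by omega, hlast2, hblt, hI⟩
      simp only [shrinkA]
      rw [if_pos ⟨hf, by omega, hb⟩]
      exact heq

theorem outerA_front_ge (A : List Int) :
    ∀ fuel sum front back seen, A.length ≤ front →
    outerA A fuel sum front back seen = sum := by
  intro fuel
  induction fuel with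
  | zero => intro sum front back seen _; rfl
  | succ fuel _ =>
    intro sum front back seen h
    simp only [outerA]
    rw [if_neg (fun hc => absurd hc.1 (by omega))]

-- the outer loop of A computes runB
theorem outer_sim (M : Int) (A : List Int) (hM : 0 ≤ M) (hR : ∀ x ∈ A, -(M + 1) ≤ x ∧ x ≤ M)
    (hinj : ∀ x ∈ A, ∀ y ∈ A, x % (M + 1) = y % (M + 1) → x = y) :
    ∀ k f back sum seen last, A.length - back ≤ k → SimInv M A f back seen last →
    outerA A k sum f back seen = runB A sum f (back : Int) last := by
  intro k
  induction k with
  | zero =>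
    intro f back sum seen last hk hInv
    have hb1 := hInv.1
    have hb2 := hInv.2.1
    have h2 : ¬ f < A.length := by omega
    rw [runB, dif_neg h2]; rfl
  | succ k ih =>
    intro f back sum seen last hk hInv
    by_cases hf : f < A.length
    · have hb1 := hInv.1
      have hguard : f < A.length ∧ back < A.length := ⟨hf, by omega⟩
      obtain ⟨f', sum', seen', last', hgrow, hInv', hle, hrun, hstop⟩ :=
        grow_sim M A hM hR hinj (A.length - f) f back sum seen last (le_refl _) hInv
      simp only [outerA]
      rw [if_pos hguard]
      simp only [hgrow]
      by_cases hf' : f' < A.length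
      · obtain ⟨back₂, seen₂, hshrink, hbb, hlastb, hb2f, hInv₂⟩ :=
          shrink_sim M A hM hR hinj f' last' hf' (A.length - back) back seen'
            (by have := hInv'.2.1; omega) hInv' (hstop hf')
        simp only [hshrink]
        have hblen := hguard.2
        rw [ih f' (back₂ + 1) sum' _ last' (by omega) hInv₂]
        rw [hrun]
        have hcast : ((back₂ + 1 : Nat) : Int) = (back₂ : Int) + 1 := by push_cast; ring
        rw [hcast]
        have hprev : last'.getD (A.getD f' 0) (-1) = (back₂ : Int) := by
          rw [hInv'.2.2.2.2.2 (A.getD f' 0), ← hlastb]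
        conv_lhs => rw [runB, dif_pos hf']
        conv_rhs => rw [runB, dif_pos hf']
        simp only [hprev, ge_iff_le]
        rw [if_neg (by omega : ¬ ((back₂ : Int) + 1 ≤ (back₂ : Int))),
          if_pos (by exact_mod_cast hbb : ((back : Nat) : Int) ≤ (back₂ : Int))]
      · rw [outerA_front_ge A k _ _ _ _ (by omega)]
        rw [hrun, runB, dif_neg hf']
    · simp only [outerA]
      rw [if_neg (fun hc => hf hc.1), runB, dif_neg hf]

theorem getD_replicate_false (n s : Nat) :
    (List.replicate n (false : Bool)).getD s false = false := by
  rw [List.getD_eq_getElem?_getD, List.getElem?_replicate]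
  by_cases h : s < n
  · rw [if_pos h]; rfl
  · rw [if_neg h]; rfl

theorem solution_init_inv (M : Int) (A : List Int) (hM : 0 ≤ M)
    (hR : ∀ x ∈ A, -(M + 1) ≤ x ∧ x ≤ M) :
    SimInv M A 0 0 (PySem.List.pyRepeat [false] (M + 1)) PySem.Dict.empty := by
  rw [PySem.List.pyRepeat_singleton]
  refine ⟨le_refl 0, Nat.zero_le _, by rw [List.length_replicate], ?_, ?_, ?_⟩
  · intro v hvmem
    have hvb := hR v hvmem
    rw [pyGetD_mod _ v false (by rw [List.length_replicate]; omega)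
      (by rw [List.length_replicate]; omega), getD_replicate_false]
    constructor
    · intro h; exact absurd h (by simp)
    · rintro ⟨j, _, hj, _⟩; omega
  · intro i j _ _ h3; omega
  · intro v; rw [PySem.Dict.getD_empty]; rfl

-- ===== VERDICT =====
theorem solution_spec : Claim_unchanged_solution := by
  unfold Claim_unchanged_solution
  intro M A _hDom hPre
  unfold Spec_solution
  intro hnD
  have hinj : ∀ x ∈ A, ∀ y ∈ A, x % (M + 1) = y % (M + 1) → x = y := by
    intro x hx y hy hmod
    by_contra hne
    exact hnD ⟨x, hx, y, hy, hne, hmod⟩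
  rcases eq_or_ne A [] with hnil | hnil
  · subst hnil
    rw [solution, outerA_front_ge [] _ _ _ _ _ (by simp)]
    simp [solution_alt, PySem.List.enumerate_nil]
  · have hM : 0 ≤ M := by
      obtain ⟨x, hx⟩ := List.exists_mem_of_ne_nil A hnil
      have := hPre x hx; omega
    rw [solution, solution_alt_eq_runB]
    rw [outer_sim M A hM hPre hinj A.length 0 0 0 _ PySem.Dict.empty
      (by omega) (solution_init_inv M A hM hPre)]
    norm_num

theorem solution_changed : Claim_changed_solution := by
  unfold Claim_changed_solution; decide
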